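-- pv_equiv track=rewrite | github.com/ruszmate33/Advent-of-Code-2023 | Python/day1.py | extract_number_from_line
-- ===== SOURCE A (Python) =====
-- SPEC_DIGITS = [
--     'one',
--     'two',
--     'three',
--     'four',
--     'five',
--     'six',
--     'seven',
--     'eight',
--     'nine'
--     ]
--
-- def extract_number_from_line(line: str, include_alphabetic=False) -> int:
--     num = ''
--     for i, char in enumerate(line):
--         if char.isdigit():
--             num += char
--         if include_alphabetic:
--             for d, val in enumerate(SPEC_DIGITS, start=1):
--                 if line[i:].startswith(val):
--                     num += str(d)
--
--     if not num:
--         return 0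
--     num = num[0] + num[-1]
--     return int(num)
-- ===== SOURCE B (Python) =====
-- SPEC_DIGITS = [
--     'one',
--     'two',
--     'three',
--     'four',
--     'five',
--     'six',
--     'seven',
--     'eight',
--     'nine'
--     ]
--
-- def _digit_at(line, i, include_alphabetic):
--     c = line[i]
--     if c.isdigit():
--         return int(c)
--     if include_alphabetic:
--         for d, word in enumerate(SPEC_DIGITS, start=1):
--             if line[i:].startswith(word):
--                 return d
--     return None
--
-- def extract_number_from_line(line, include_alphabetic=False):
--     n = len(line)
--     first = None
--     for i in range(n):
--         first = _digit_at(line, i, include_alphabetic)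
--         if first is not None:
--             break
--     if first is None:
--         return 0
--     for i in range(n - 1, -1, -1):
--         last = _digit_at(line, i, include_alphabetic)
--         if last is not None:
--             break
--     return 10 * first + last
-- ===== Notes on version B (the rewrite author's own statement) =====
-- stated objective: alternative
-- what changed: Instead of building the full string of all digit occurrences and then taking its first and last character, B factors a digit-at-position helper and does two early-exit scans, one forward for the first digit and one backward for the last, combining them arithmetically as 10*first+last.
import Mathlib
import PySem

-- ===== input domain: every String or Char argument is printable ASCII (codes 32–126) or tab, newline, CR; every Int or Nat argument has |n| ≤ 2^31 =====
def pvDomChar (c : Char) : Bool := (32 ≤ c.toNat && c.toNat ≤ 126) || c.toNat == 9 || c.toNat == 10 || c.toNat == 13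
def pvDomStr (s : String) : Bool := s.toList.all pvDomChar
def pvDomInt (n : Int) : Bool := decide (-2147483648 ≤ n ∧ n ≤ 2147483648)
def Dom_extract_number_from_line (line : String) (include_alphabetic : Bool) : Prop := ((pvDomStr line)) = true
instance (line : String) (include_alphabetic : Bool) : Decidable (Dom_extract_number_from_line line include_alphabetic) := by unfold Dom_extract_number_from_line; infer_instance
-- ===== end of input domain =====

-- B replaces A's "collect every digit occurrence into a string, then take its ends" by a
-- digit-at-position helper with one forward and one backward early-exit scan (alternative decomposition).

def SPEC_DIGITS : List String := ["one", "two", "three", "four", "five", "six", "seven", "eight", "nine"]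

-- ===== PORT A =====
-- the body of A's outer `for i, char in enumerate(line)` loop (inner loop over SPEC_DIGITS included)
def pvBodyA (line : String) (include_alphabetic : Bool) (num : List Char) (p : Int × Char) : List Char :=
  let num := if PySem.Chars.isdigit p.2 then num ++ [p.2] else num
  if include_alphabetic then
    (PySem.List.enumerate SPEC_DIGITS 1).foldl (fun num q =>
      if PySem.Str.startswith (PySem.Str.slice line (some p.1) none) q.2 then
        num ++ (PySem.Int.toStr q.1).toList
      else num) num
  else num

def extract_number_from_line (line : String) (include_alphabetic : Bool) : Int :=
  let num := (PySem.List.enumerate line.toList 0).foldl (pvBodyA line include_alphabetic) []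
  if num = [] then 0
  else
    -- num[0] and num[-1]; num ≠ [] here, so the `.getD ' '` defaults are never used
    let c0 := (PySem.List.pyGet? num 0).getD ' '
    let c1 := (PySem.List.pyGet? num (-1)).getD ' '
    -- int(num[0] + num[-1]); num consists of digit characters, so int() always parses
    (PySem.Int.ofChars? [c0, c1]).getD 0

-- ===== PORT B =====
-- B's `for d, word in enumerate(SPEC_DIGITS, start=1): if line[i:].startswith(word): return d`
def pvWordSearch (suf : List Char) : Int → List String → Option Int
  | _, [] => none
  | d, w :: ws => if PySem.Chars.startswith suf w.toList then some d else pvWordSearch suf (d + 1) ws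

-- B's helper _digit_at(line, i, include_alphabetic); int(c) on an ASCII digit char is its code − 48 (exact)
def pvDigitAt (cs : List Char) (inc : Bool) (i : Nat) : Option Int :=
  match cs[i]? with
  | none => none
  | some c =>
    if PySem.Chars.isdigit c then some ((c.toNat : Int) - 48)
    else if inc then pvWordSearch (cs.drop i) 1 SPEC_DIGITS
    else none

-- B's forward loop `for i in range(n)` with break at the first hit
def pvScanF (cs : List Char) (inc : Bool) (i : Nat) : Option Int :=
  if i < cs.length then
    match pvDigitAt cs inc i with
    | some v => some v
    | none => pvScanF cs inc (i + 1)
  else none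
termination_by cs.length - i

-- B's backward loop `for i in range(n-1, -1, -1)` with break at the first hit (argument = number of
-- positions still to inspect, so `pvScanB cs inc n` starts at index n-1 and walks down to 0)
def pvScanB (cs : List Char) (inc : Bool) : Nat → Option Int
  | 0 => none
  | i + 1 =>
    match pvDigitAt cs inc i with
    | some v => some v
    | none => pvScanB cs inc i

def extract_number_from_line_alt (line : String) (include_alphabetic : Bool) : Int :=
  let cs := line.toList
  match pvScanF cs include_alphabetic 0 with
  | none => 0
  | some first =>
    match pvScanB cs include_alphabetic cs.length with
    | some last => 10 * first + last
    | none => 0   -- unreachable: a forward hit implies a backward hit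

-- ===== PRECONDITION & SPEC =====
def Spec_extract_number_from_line (line : String) (include_alphabetic : Bool) (out : Int) : Prop := out = extract_number_from_line_alt line include_alphabetic
instance (line : String) (include_alphabetic : Bool) (out : Int) : Decidable (Spec_extract_number_from_line line include_alphabetic out) := by unfold Spec_extract_number_from_line; infer_instance

-- ===== CLAIM (what is proved, stated in full; the proofs are below) =====
def Claim_equal_extract_number_from_line : Prop := ∀ (line : String) (include_alphabetic : Bool), Dom_extract_number_from_line line include_alphabetic → Spec_extract_number_from_line line include_alphabetic (extract_number_from_line line include_alphabetic)

-- ===== LEMMAS AND PROOFS =====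

-- the character written for the digit value v (0 ≤ v ≤ 9)
def pvDigitChar (v : Int) : Char := Char.ofNat (48 + v.toNat)

-- the characters A appends while scanning the spelled digits at suffix `suf`
def pvWordEmit (suf : List Char) : List Char :=
  (PySem.List.enumerate SPEC_DIGITS 1).flatMap
    (fun q => if q.2.toList <+: suf then (PySem.Int.toStr q.1).toList else [])

-- the characters A appends at position i of cs
def pvEmitAt (cs : List Char) (inc : Bool) (i : Nat) : List Char :=
  match cs[i]? with
  | none => []
  | some c => (if PySem.Chars.isdigit c then [c] else []) ++ (if inc then pvWordEmit (cs.drop i) else [])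

theorem pv_foldl_if_append {α : Type} (l : List α) (c : α → Bool) (g : α → List Char) (acc : List Char) :
    l.foldl (fun a x => if c x then a ++ g x else a) acc
      = acc ++ l.flatMap (fun x => if c x then g x else []) := by
  induction l generalizing acc with
  | nil => simp
  | cons x xs ih => by_cases h : c x <;> simp [h, ih]

theorem pv_startswith_slice (line : String) (k : Nat) (w : String) :
    PySem.Str.startswith (PySem.Str.slice line (some (k : Int)) none) w
      = w.toList.isPrefixOf (line.toList.drop k) := by
  rw [PySem.Str.startswith_eq, Bool.eq_iff_iff, PySem.Chars.startswith_iff, List.isPrefixOf_iff_prefix,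
    PySem.Str.toList_slice, PySem.Chars.slice_eq_listSlice, PySem.List.slice_from_natCast]

theorem pv_inner_eq (line : String) (k : Nat) (acc : List Char) :
    (PySem.List.enumerate SPEC_DIGITS 1).foldl (fun num q =>
        if PySem.Str.startswith (PySem.Str.slice line (some (k : Int)) none) q.2 then
          num ++ (PySem.Int.toStr q.1).toList
        else num) acc
      = acc ++ pvWordEmit (line.toList.drop k) := by
  simp only [pv_startswith_slice]
  rw [pv_foldl_if_append]
  unfold pvWordEmit
  simp [List.isPrefixOf_iff_prefix]

theorem pv_bodyA_eq (line : String) (inc : Bool) (k : Nat) (c : Char) (acc : List Char)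
    (h : line.toList[k]? = some c) :
    pvBodyA line inc acc ((k : Int), c) = acc ++ pvEmitAt line.toList inc k := by
  unfold pvBodyA
  simp only [pvEmitAt, h]
  cases inc with
  | true =>
    by_cases hd : PySem.Chars.isdigit c <;>
      · simp only [hd, if_true, if_false, Bool.false_eq_true]
        rw [pv_inner_eq]
        simp
  | false => by_cases hd : PySem.Chars.isdigit c <;> simp [hd]

theorem pv_foldA (line : String) (inc : Bool) :
    ∀ (tail : List Char) (k : Nat) (acc : List Char), tail = line.toList.drop k →
      (PySem.List.enumerate tail (k : Int)).foldl (pvBodyA line inc) acc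
        = acc ++ (List.range' k (line.toList.length - k)).flatMap (pvEmitAt line.toList inc) := by
  intro tail
  induction tail with
  | nil =>
    intro k acc h
    have hk : line.toList.length ≤ k := List.drop_eq_nil_iff.mp h.symm
    rw [Nat.sub_eq_zero_of_le hk]
    simp [PySem.List.enumerate_nil]
  | cons c rest ih =>
    intro k acc h
    have hk : k < line.toList.length := by
      by_contra hk
      rw [List.drop_eq_nil_of_le (by omega)] at h
      simp at h
    have hget : line.toList[k]? = some c := by
      have h0 : (line.toList.drop k)[0]? = line.toList[k]? := by
        simp [List.getElem?_drop]
      rw [← h0, ← h]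
      rfl
    have hrest : rest = line.toList.drop (k + 1) := by
      have h1 : (line.toList.drop k).tail = line.toList.drop (k + 1) := by
        rw [List.tail_drop]
      rw [← h1, ← h]
      rfl
    have hlen : line.toList.length - k = (line.toList.length - (k + 1)) + 1 := by omega
    rw [PySem.List.enumerate_cons, List.foldl_cons, pv_bodyA_eq line inc k c acc hget,
      hlen, List.range'_succ, List.flatMap_cons]
    have hcast : (k : Int) + 1 = ((k + 1 : Nat) : Int) := by push_cast; ring
    rw [hcast, ih (k + 1) _ hrest, List.append_assoc]

theorem pv_num_eq (line : String) (inc : Bool) :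
    (PySem.List.enumerate line.toList 0).foldl (pvBodyA line inc) []
      = (List.range' 0 line.toList.length).flatMap (pvEmitAt line.toList inc) := by
  have := pv_foldA line inc line.toList 0 [] (by simp)
  simpa using this

-- literal spellings
theorem pv_t1 : ("one" : String).toList = ['o','n','e'] := rfl
theorem pv_t2 : ("two" : String).toList = ['t','w','o'] := rfl
theorem pv_t3 : ("three" : String).toList = ['t','h','r','e','e'] := rfl
theorem pv_t4 : ("four" : String).toList = ['f','o','u','r'] := rfl
theorem pv_t5 : ("five" : String).toList = ['f','i','v','e'] := rfl
theorem pv_t6 : ("six" : String).toList = ['s','i','x'] := rfl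
theorem pv_t7 : ("seven" : String).toList = ['s','e','v','e','n'] := rfl
theorem pv_t8 : ("eight" : String).toList = ['e','i','g','h','t'] := rfl
theorem pv_t9 : ("nine" : String).toList = ['n','i','n','e'] := rfl

-- two distinct words of the table are never both prefixes of the same suffix
theorem pv_prefix_excl_one (a b : Char) (u v suf : List Char) (hne : a ≠ b) :
    ¬(a :: u <+: suf ∧ b :: v <+: suf) := by
  rintro ⟨⟨t, rfl⟩, h2⟩
  simp only [List.cons_append] at h2
  rw [List.cons_prefix_iff] at h2
  obtain ⟨l', he, -⟩ := h2
  injection he with hab _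
  exact hne hab

theorem pv_prefix_excl_two (a b c : Char) (u v suf : List Char) (hne : b ≠ c) :
    ¬(a :: b :: u <+: suf ∧ a :: c :: v <+: suf) := by
  rintro ⟨⟨t, rfl⟩, h2⟩
  simp only [List.cons_append] at h2
  rw [List.cons_prefix_iff] at h2
  obtain ⟨l', he, h3⟩ := h2
  injection he with _ he2
  subst he2
  rw [List.cons_prefix_iff] at h3
  obtain ⟨l'', he'', -⟩ := h3
  injection he'' with hbc _
  exact hne hbc

theorem pv_prefix_excl (suf : List Char) :
    (PySem.List.enumerate SPEC_DIGITS 1).Pairwise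
      (fun p q => ¬(p.2.toList <+: suf ∧ q.2.toList <+: suf)) := by
  simp only [SPEC_DIGITS, PySem.List.enumerate_cons, PySem.List.enumerate_nil]
  norm_num [List.pairwise_cons, pv_t1, pv_t2, pv_t3, pv_t4, pv_t5, pv_t6, pv_t7, pv_t8, pv_t9]
  and_intros <;>
    · intro h1 h2
      first
        | exact pv_prefix_excl_one _ _ _ _ _ (by decide) ⟨h1, h2⟩
        | exact pv_prefix_excl_two _ _ _ _ _ _ (by decide) ⟨h1, h2⟩

-- a digit character at the head rules out every spelled word
theorem pv_digit_no_word (c : Char) (rest : List Char) (hc : PySem.Chars.isdigit c = true) :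
    ∀ q ∈ PySem.List.enumerate SPEC_DIGITS 1, ¬(q.2.toList <+: c :: rest) := by
  intro q hq
  simp only [SPEC_DIGITS, PySem.List.enumerate_cons, PySem.List.enumerate_nil] at hq
  norm_num at hq
  rcases hq with rfl | rfl | rfl | rfl | rfl | rfl | rfl | rfl | rfl <;>
  · rintro ⟨t, ht⟩
    simp only [pv_t1, pv_t2, pv_t3, pv_t4, pv_t5, pv_t6, pv_t7, pv_t8, pv_t9,
      List.cons_append, List.nil_append] at ht
    injection ht with h1 _
    rw [← h1] at hc
    exact absurd hc (by decide)

theorem pv_ws_eq_findSome (suf : List Char) :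
    ∀ (ws : List String) (d : Int),
      pvWordSearch suf d ws
        = (PySem.List.enumerate ws d).findSome?
            (fun q => if q.2.toList <+: suf then some q.1 else none) := by
  intro ws
  induction ws with
  | nil => intro d; simp [pvWordSearch, PySem.List.enumerate]
  | cons w ws ih =>
    intro d
    rw [PySem.List.enumerate_cons]
    by_cases h : w.toList <+: suf
    · have hb : PySem.Chars.startswith suf w.toList = true := (PySem.Chars.startswith_iff _ _).mpr h
      simp [pvWordSearch, hb, h]
    · have hb : PySem.Chars.startswith suf w.toList = false := by
        rw [Bool.eq_false_iff]
        intro hx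
        exact h ((PySem.Chars.startswith_iff _ _).mp hx)
      simp [pvWordSearch, hb, h, ih]

theorem pv_flatMap_nil_of_none (suf : List Char) (ps : List (Int × String))
    (h : ∀ q ∈ ps, ¬(q.2.toList <+: suf)) :
    ps.flatMap (fun q => if q.2.toList <+: suf then (PySem.Int.toStr q.1).toList else []) = [] := by
  rw [List.flatMap_eq_nil_iff]
  intro q hq
  rw [if_neg (h q hq)]

theorem pv_flatMap_first (suf : List Char) :
    ∀ (ps : List (Int × String)),
      ps.Pairwise (fun p q => ¬(p.2.toList <+: suf ∧ q.2.toList <+: suf)) →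
      ps.flatMap (fun q => if q.2.toList <+: suf then (PySem.Int.toStr q.1).toList else [])
        = (match ps.findSome? (fun q => if q.2.toList <+: suf then some q.1 else none) with
           | none => []
           | some d => (PySem.Int.toStr d).toList) := by
  intro ps
  induction ps with
  | nil => intro _; simp
  | cons q ps ih =>
    intro hpw
    rw [List.pairwise_cons] at hpw
    by_cases h : q.2.toList <+: suf
    · have hrest : ∀ r ∈ ps, ¬(r.2.toList <+: suf) := fun r hr hx => hpw.1 r hr ⟨h, hx⟩
      have hnil := pv_flatMap_nil_of_none suf ps hrest
      simp only [List.flatMap_cons, List.findSome?_cons, if_pos h]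
      rw [hnil]
      simp
    · simp only [List.flatMap_cons, List.findSome?_cons, if_neg h, List.nil_append]
      exact ih hpw.2

theorem pv_ws_range (suf : List Char) :
    ∀ (ws : List String) (d v : Int), pvWordSearch suf d ws = some v → d ≤ v ∧ v < d + ws.length := by
  intro ws
  induction ws with
  | nil => intro d v h; simp [pvWordSearch] at h
  | cons w ws ih =>
    intro d v h
    unfold pvWordSearch at h
    by_cases hc : PySem.Chars.startswith suf w.toList
    · rw [if_pos hc] at h
      injection h with h
      subst h
      simp only [List.length_cons]
      constructor <;> omega
    · rw [if_neg hc] at h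
      have := ih (d + 1) v h
      simp only [List.length_cons]
      omega

theorem pv_toStr_digitChar (v : Int) (h1 : 1 ≤ v) (h9 : v ≤ 9) :
    (PySem.Int.toStr v).toList = [pvDigitChar v] := by
  interval_cases v <;> decide

-- the characters A appends at position i are exactly B's digit-at-position result
theorem pv_emit_eq (cs : List Char) (inc : Bool) (i : Nat) :
    pvEmitAt cs inc i
      = (match pvDigitAt cs inc i with
         | none => []
         | some v => [pvDigitChar v]) := by
  unfold pvEmitAt pvDigitAt
  cases hget : cs[i]? with
  | none => simp
  | some c =>
    have hi : i < cs.length := by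
      by_contra hi
      rw [List.getElem?_eq_none (by omega)] at hget
      simp at hget
    have hdrop : cs.drop i = c :: cs.drop (i + 1) := by
      rw [List.drop_eq_getElem_cons hi]
      have : cs[i] = c := by
        have := List.getElem?_eq_getElem hi
        rw [hget] at this
        injection this with h
        exact h.symm
      rw [this]
    by_cases hd : PySem.Chars.isdigit c
    · have hw : pvWordEmit (cs.drop i) = [] := by
        unfold pvWordEmit
        rw [hdrop]
        exact pv_flatMap_nil_of_none _ _ (pv_digit_no_word c _ hd)
      have hc' : 48 ≤ c.toNat ∧ c.toNat ≤ 57 := by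
        simp only [PySem.Chars.isdigit, Bool.and_eq_true, decide_eq_true_eq, Char.le_def] at hd
        exact ⟨hd.1, hd.2⟩
      have hchar : pvDigitChar ((c.toNat : Int) - 48) = c := by
        unfold pvDigitChar
        have : 48 + ((c.toNat : Int) - 48).toNat = c.toNat := by omega
        rw [this, Char.ofNat_toNat]
      cases inc <;> simp [hd, hw, hchar]
    · cases inc with
      | false => simp [hd]
      | true =>
        simp only [hd, if_false, if_true, Bool.false_eq_true, List.nil_append]
        rw [pv_ws_eq_findSome]
        unfold pvWordEmit
        rw [pv_flatMap_first _ _ (pv_prefix_excl _)]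
        cases hfs : (PySem.List.enumerate SPEC_DIGITS 1).findSome?
            (fun q => if q.2.toList <+: (cs.drop i) then some q.1 else none) with
        | none => simp
        | some v =>
          have hv : 1 ≤ v ∧ v ≤ 9 := by
            have := pv_ws_range (cs.drop i) SPEC_DIGITS 1 v
            rw [pv_ws_eq_findSome, hfs] at this
            have h2 := this rfl
            simp [SPEC_DIGITS] at h2
            omega
          simp [pv_toStr_digitChar v hv.1 hv.2]

theorem pv_flatMap_optSingle (l : List Nat) (f : Nat → Option Int) :
    l.flatMap (fun i => match f i with | none => [] | some v => [pvDigitChar v])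
      = (l.filterMap f).map pvDigitChar := by
  induction l with
  | nil => simp
  | cons i l ih =>
    cases h : f i <;> simp [h, ih]

theorem pv_scanF_eq (cs : List Char) (inc : Bool) :
    ∀ (m i : Nat), m = cs.length - i →
      pvScanF cs inc i = ((List.range' i m).filterMap (pvDigitAt cs inc)).head? := by
  intro m
  induction m with
  | zero =>
    intro i h
    rw [pvScanF, if_neg (by omega)]
    simp
  | succ m ih =>
    intro i h
    rw [pvScanF, if_pos (by omega), List.range'_succ, List.filterMap_cons]
    cases hd : pvDigitAt cs inc i with
    | some v => simp
    | none => simpa using ih (i + 1) (by omega)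

theorem pv_scanB_eq (cs : List Char) (inc : Bool) :
    ∀ (k : Nat), pvScanB cs inc k = ((List.range' 0 k).filterMap (pvDigitAt cs inc)).getLast? := by
  intro k
  induction k with
  | zero => simp [pvScanB]
  | succ k ih =>
    have hr : List.range' 0 (k + 1) = List.range' 0 k ++ [k] := by
      have := List.range'_concat (s := 0) (n := k) (step := 1)
      simpa using this
    rw [pvScanB, hr, List.filterMap_append, List.getLast?_append]
    cases hd : pvDigitAt cs inc k with
    | some v => simp [hd]
    | none => simp [hd, ih]

theorem pv_digitAt_range (cs : List Char) (inc : Bool) (i : Nat) (v : Int)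
    (h : pvDigitAt cs inc i = some v) : 0 ≤ v ∧ v ≤ 9 := by
  unfold pvDigitAt at h
  split at h
  · simp at h
  · rename_i c hget
    by_cases hd : PySem.Chars.isdigit c
    · rw [if_pos hd] at h
      injection h with h
      have hd' := hd
      simp only [PySem.Chars.isdigit, Bool.and_eq_true, decide_eq_true_eq, Char.le_def] at hd'
      have hc' : 48 ≤ c.toNat ∧ c.toNat ≤ 57 := ⟨hd'.1, hd'.2⟩
      omega
    · rw [if_neg hd] at h
      cases inc with
      | false => simp at h
      | true =>
        simp only [if_true] at h
        have := pv_ws_range (cs.drop i) SPEC_DIGITS 1 v h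
        simp [SPEC_DIGITS] at this
        omega

theorem pv_ofChars_two (x y : Int) (hx0 : 0 ≤ x) (hx9 : x ≤ 9) (hy0 : 0 ≤ y) (hy9 : y ≤ 9) :
    PySem.Int.ofChars? [pvDigitChar x, pvDigitChar y] = some (10 * x + y) := by
  interval_cases x <;> interval_cases y <;> decide

theorem pv_getLast?_map (l : List Int) :
    (l.map pvDigitChar).getLast? = l.getLast?.map pvDigitChar := by
  induction l with
  | nil => rfl
  | cons x l ih =>
    cases l with
    | nil => rfl
    | cons y l => simpa using ih

theorem pv_mem_vals_range (cs : List Char) (inc : Bool) (n : Nat) (v : Int)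
    (h : v ∈ (List.range' 0 n).filterMap (pvDigitAt cs inc)) : 0 ≤ v ∧ v ≤ 9 := by
  obtain ⟨i, -, hi⟩ := List.mem_filterMap.mp h
  exact pv_digitAt_range cs inc i v hi

-- ===== VERDICT (by name: the statement is the Claim_ definition above) =====
theorem extract_number_from_line_spec : Claim_equal_extract_number_from_line := by
  intro line inc _dom
  unfold Spec_extract_number_from_line extract_number_from_line extract_number_from_line_alt
  dsimp only
  have hnum : (PySem.List.enumerate line.toList 0).foldl (pvBodyA line inc) []
      = ((List.range' 0 line.toList.length).filterMap (pvDigitAt line.toList inc)).map pvDigitChar := by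
    rw [pv_num_eq line inc,
      show (pvEmitAt line.toList inc) = (fun i => match pvDigitAt line.toList inc i with
        | none => [] | some v => [pvDigitChar v]) from funext (pv_emit_eq line.toList inc),
      pv_flatMap_optSingle]
  have hF : pvScanF line.toList inc 0
      = ((List.range' 0 line.toList.length).filterMap (pvDigitAt line.toList inc)).head? := by
    rw [pv_scanF_eq line.toList inc line.toList.length 0 (by omega)]
  have hB : pvScanB line.toList inc line.toList.length
      = ((List.range' 0 line.toList.length).filterMap (pvDigitAt line.toList inc)).getLast? :=
    pv_scanB_eq line.toList inc line.toList.length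
  rw [hnum, hF, hB]
  cases hv : (List.range' 0 line.toList.length).filterMap (pvDigitAt line.toList inc) with
  | nil => simp
  | cons v vs =>
    have hne : v :: vs ≠ [] := by simp
    obtain ⟨l, hl⟩ := Option.isSome_iff_exists.mp (List.getLast?_isSome.mpr hne)
    have hvb : 0 ≤ v ∧ v ≤ 9 := by
      refine pv_mem_vals_range line.toList inc line.toList.length v ?_
      rw [hv]
      exact List.mem_cons_self ..
    have hlb : 0 ≤ l ∧ l ≤ 9 := by
      refine pv_mem_vals_range line.toList inc line.toList.length l ?_
      rw [hv]
      exact List.mem_of_getLast? hl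
    have hget0 : PySem.List.pyGet? ((v :: vs).map pvDigitChar) 0 = some (pvDigitChar v) := by
      simp
    have hgetN : PySem.List.pyGet? ((v :: vs).map pvDigitChar) (-1) = some (pvDigitChar l) := by
      rw [PySem.List.pyGet?_neg_one, pv_getLast?_map, hl]
      rfl
    rw [hl]
    rw [if_neg (by simp : ¬((v :: vs).map pvDigitChar = []))]
    rw [hget0, hgetN]
    simp only [Option.getD_some, List.head?_cons]
    rw [pv_ofChars_two v l hvb.1 hvb.2 hlb.1 hlb.2]
    rfl
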